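-- pv_equiv track=rewrite | github.com/LennartElbe/codeEvo | StudentProblem/10.21.12.21/1/1569576006.py | nwords
-- ===== SOURCE A (Python) =====
-- def nwords(s: str):
--     """berechnet anz worte im string"""
--     letters = "ABCDEFGHIJKLMNOPQRSTUVWXYZabcdefghijklmnopqrstuvwxyz"
--     take = 0
--     skip = 0
--     for i in s:
--         if i not in letters:
--             take += 1
--         else:
--             skip += 1
--     res = (len(s) - skip)
--     return res
-- ===== SOURCE B (Python) =====
-- def nwords(s: str):
--     """berechnet anz worte im string"""
--     letters = "ABCDEFGHIJKLMNOPQRSTUVWXYZabcdefghijklmnopqrstuvwxyz"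
--     freq = {}
--     for ch in s:
--         freq[ch] = freq.get(ch, 0) + 1
--     alpha = 0
--     for c in letters:
--         alpha += freq.get(c, 0)
--     return len(s) - alpha
-- ===== Notes on version B (the rewrite author's own statement) =====
-- stated objective: alternative
-- what changed: Instead of testing each input character against the 52-letter string, B builds a character-frequency histogram of s in one dict pass and then sums the histogram entries of the 52 letters, returning len(s) minus that sum; the per-character membership scan disappears.
import Mathlib
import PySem

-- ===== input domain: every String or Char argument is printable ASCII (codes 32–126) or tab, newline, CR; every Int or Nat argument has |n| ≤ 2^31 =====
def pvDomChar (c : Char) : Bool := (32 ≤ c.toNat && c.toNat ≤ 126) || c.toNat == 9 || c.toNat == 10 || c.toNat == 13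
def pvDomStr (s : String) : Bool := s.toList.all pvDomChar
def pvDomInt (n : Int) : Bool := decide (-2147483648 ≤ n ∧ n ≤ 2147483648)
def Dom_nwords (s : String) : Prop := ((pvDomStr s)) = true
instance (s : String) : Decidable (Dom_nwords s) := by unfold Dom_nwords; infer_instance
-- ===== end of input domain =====

-- B replaces A's per-character letter-membership loop by a one-pass frequency histogram of s
-- followed by summing the histogram entries of the 52 letters (alternative decomposition).

-- ===== PORT A =====
def pvLetters : List Char := "ABCDEFGHIJKLMNOPQRSTUVWXYZabcdefghijklmnopqrstuvwxyz".toList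

-- the loop body: if i not in letters, take += 1, else skip += 1
def nwordsStep (p : Int × Int) (i : Char) : Int × Int :=
  if ¬ pvLetters.contains i then (p.1 + 1, p.2) else (p.1, p.2 + 1)

def nwords (s : String) : Int :=
  let final := s.toList.foldl nwordsStep (0, 0)
  (s.toList.length : Int) - final.2

-- ===== PORT B =====
-- freq[ch] = freq.get(ch, 0) + 1 over s; then alpha += freq.get(c, 0) over the letters
def nwords_alt (s : String) : Int :=
  let freq := s.toList.foldl (fun d ch => d.insert ch (d.getD ch 0 + 1))
      (PySem.Dict.empty : PySem.Dict Char Int)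
  let alpha := pvLetters.foldl (fun a c => a + freq.getD c 0) (0 : Int)
  (s.toList.length : Int) - alpha

-- ===== PRECONDITION & SPEC =====
def Spec_nwords (s : String) (out : Int) : Prop := out = nwords_alt s
instance (s : String) (out : Int) : Decidable (Spec_nwords s out) := by unfold Spec_nwords; infer_instance

-- ===== CLAIM (what is proved, stated in full; the proofs are below) =====
def Claim_equal_nwords : Prop := ∀ (s : String), Dom_nwords s → Spec_nwords s (nwords s)

-- ===== LEMMAS AND PROOFS =====

-- A's skip accumulator counts the letters seen
theorem nwords_skip (l : List Char) : ∀ t k : Int,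
    (l.foldl nwordsStep (t, k)).2
      = k + ((l.filter (fun c => decide (c ∈ pvLetters))).length : Int) := by
  induction l with
  | nil => intro t k; simp
  | cons c l ih =>
    intro t k
    by_cases h : c ∈ pvLetters
    · rw [List.foldl_cons, show nwordsStep (t, k) c = (t, k + 1) from by simp [nwordsStep, h]]
      simp [h, ih]
      omega
    · rw [List.foldl_cons, show nwordsStep (t, k) c = (t + 1, k) from by simp [nwordsStep, h]]
      simp [h, ih]

-- splitting a membership filter at a fresh head key
theorem filter_cons_len (c : Char) (L l : List Char) (hc : c ∉ L) :
    (l.filter (fun x => decide (x = c ∨ x ∈ L))).length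
      = l.count c + (l.filter (fun x => decide (x ∈ L))).length := by
  have hp : (fun x : Char => decide (x = c ∨ x ∈ L))
      = (fun x : Char => decide (x = c) || decide (x ∈ L)) := by
    funext x
    by_cases h1 : x = c <;> by_cases h2 : x ∈ L <;> simp [h1, h2]
  rw [hp]
  induction l with
  | nil => simp
  | cons x l ihl =>
    rw [List.filter_cons, List.filter_cons, List.count_cons]
    by_cases h1 : x = c
    · subst h1
      simp [hc, ihl]
      omega
    · by_cases h2 : x ∈ L <;> simp [h1, h2, ihl] <;> omega

-- summing counts over a duplicate-free key list = length of the filter by membership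
theorem sum_counts_eq_filter (l : List Char) : ∀ (L : List Char), L.Nodup → ∀ a : Int,
    L.foldl (fun a c => a + (l.count c : Int)) a
      = a + ((l.filter (fun c => decide (c ∈ L))).length : Int) := by
  intro L
  induction L with
  | nil => intro _ a; simp
  | cons c L ih =>
    intro hL a
    have hc : c ∉ L := (List.nodup_cons.mp hL).1
    rw [List.foldl_cons, ih (List.nodup_cons.mp hL).2 (a + (l.count c : Int))]
    have := filter_cons_len c L l hc
    simp only [List.mem_cons]
    omega

theorem pvLetters_nodup : pvLetters.Nodup := by decide

-- ===== VERDICT (by name: the statement is the Claim_ definition above) =====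
theorem nwords_spec : Claim_equal_nwords := by
  intro s _
  unfold Spec_nwords nwords nwords_alt
  dsimp only
  have hfreq : ∀ c : Char,
      (s.toList.foldl (fun d ch => d.insert ch (d.getD ch 0 + 1))
        (PySem.Dict.empty : PySem.Dict Char Int)).getD c 0 = (s.toList.count c : Int) := by
    intro c
    rw [PySem.Dict.getD_foldl_insert_add_one]
    simp
  simp only [hfreq]
  rw [sum_counts_eq_filter s.toList pvLetters pvLetters_nodup 0, nwords_skip]
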